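-- pv_equiv track=rewrite | github.com/mintpoly/labs | lab06/3.2.py | get_percentile_number
-- ===== SOURCE A (Python) =====
-- def get_percentile_number(value, percentiles):
--     k = 0
--     if value <= percentiles[0]:
--         k = 0
--     elif value >= percentiles[len(percentiles)-1]:
--         k = len(percentiles)
--     else:
--         for i in range(len(percentiles) - 1, 0, -1):
--             if percentiles[i] <= value:
--                 k = i
--                 break
--
--     return k
-- ===== SOURCE B (Python) =====
-- def _rightmost_leq(value, ps, lo, hi):
--     # Largest index i in [lo, hi) with ps[i] <= value, or 0 if there is none
--     # (divide and conquer: search the right half first, prune the left half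
--     # whenever the right half already contains a qualifying index).
--     if hi - lo <= 1:
--         return lo if lo < hi and ps[lo] <= value else 0
--     mid = (lo + hi) // 2
--     r = _rightmost_leq(value, ps, mid, hi)
--     if r:
--         return r
--     return _rightmost_leq(value, ps, lo, mid)
--
--
-- def get_percentile_number(value, percentiles):
--     n = len(percentiles)
--     if value <= percentiles[0]:
--         return 0
--     if value >= percentiles[n - 1]:
--         return n
--     return _rightmost_leq(value, percentiles, 1, n)
-- ===== Notes on version B (the rewrite author's own statement) =====
-- stated objective: alternative
-- what changed: Replaces A's backward linear break-scan by a recursive divide-and-conquer on the index range: split at the midpoint, search the right half first and descend into the left half only when the right half contains no qualifying threshold.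
import Mathlib
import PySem

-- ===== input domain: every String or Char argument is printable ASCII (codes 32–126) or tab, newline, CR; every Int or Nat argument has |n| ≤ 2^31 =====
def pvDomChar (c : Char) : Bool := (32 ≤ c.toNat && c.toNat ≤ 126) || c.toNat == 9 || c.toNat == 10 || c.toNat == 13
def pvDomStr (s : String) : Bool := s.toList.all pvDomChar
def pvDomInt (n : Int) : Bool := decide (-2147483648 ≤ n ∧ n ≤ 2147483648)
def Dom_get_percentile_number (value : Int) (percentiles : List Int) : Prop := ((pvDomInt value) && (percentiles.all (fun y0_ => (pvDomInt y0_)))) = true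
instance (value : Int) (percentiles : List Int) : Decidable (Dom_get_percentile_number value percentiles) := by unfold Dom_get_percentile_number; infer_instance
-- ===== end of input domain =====

-- B replaces A's backward linear break-scan by a divide-and-conquer over the index
-- range (right half first, left half only if the right half has no hit); same result.

-- ===== PORT A =====
-- the 'for i in range(len(percentiles)-1, 0, -1): if percentiles[i] <= value: k = i; break'
-- loop, as structural recursion over the range list; 'none' (IndexError) is unreachable
-- since every index produced by this range is within bounds
def pnLoopA (value : Int) (ps : List Int) : List Int → Int
  | [] => 0
  | i :: rest =>
    match PySem.List.pyGet? ps i with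
    | some p => if p ≤ value then i else pnLoopA value ps rest
    | none => 0

def get_percentile_number (value : Int) (percentiles : List Int) : Int :=
  match PySem.List.pyGet? percentiles 0 with
  | none => 0  -- IndexError on the empty list; excluded by Pre_
  | some p0 =>
    if value ≤ p0 then 0
    else
      match PySem.List.pyGet? percentiles ((percentiles.length : Int) - 1) with
      | none => 0  -- unreachable: the list is nonempty here
      | some plast =>
        if value ≥ plast then (percentiles.length : Int)
        else pnLoopA value percentiles
               (PySem.List.pyRange ((percentiles.length : Int) - 1) 0 (-1))

-- ===== PORT B =====
-- Source B's _rightmost_leq: largest index i in [lo, hi) with ps[i] <= value, or 0 if none;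
-- 'ps[lo]' is pyGetD (every index reached from the top-level call is in bounds);
-- 'if r:' is 'r ≠ 0'
-- structural recursion on fuel = the interval length (hi - lo), which bounds the
-- recursion depth of Source B's _rightmost_leq; fuel 0 means hi ≤ lo, where Source B's
-- base case also returns 0
def pnRightFuel (value : Int) (ps : List Int) : Nat → Int → Int → Int
  | 0, _, _ => 0
  | fuel + 1, lo, hi =>
    if hi - lo ≤ 1 then
      if lo < hi ∧ PySem.List.pyGetD ps lo 0 ≤ value then lo else 0
    else
      let mid := PySem.Int.floordiv (lo + hi) 2
      let r := pnRightFuel value ps fuel mid hi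
      if r ≠ 0 then r else pnRightFuel value ps fuel lo mid

def pnRight (value : Int) (ps : List Int) (lo hi : Int) : Int :=
  pnRightFuel value ps (hi - lo).toNat lo hi

def get_percentile_number_alt (value : Int) (percentiles : List Int) : Int :=
  match PySem.List.pyGet? percentiles 0 with
  | none => 0  -- IndexError on the empty list; excluded by Pre_
  | some p0 =>
    if value ≤ p0 then 0
    else
      match PySem.List.pyGet? percentiles ((percentiles.length : Int) - 1) with
      | none => 0  -- unreachable: the list is nonempty here
      | some plast =>
        if value ≥ plast then (percentiles.length : Int)
        else pnRight value percentiles 1 (percentiles.length : Int)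

-- ===== PRECONDITION & SPEC =====
-- Pre_ excludes only the empty list, on which A (and B) raise IndexError at percentiles[0].
def Pre_get_percentile_number (_value : Int) (percentiles : List Int) : Prop :=
  percentiles ≠ []

instance (value : Int) (percentiles : List Int) : Decidable (Pre_get_percentile_number value percentiles) := by
  unfold Pre_get_percentile_number; infer_instance

def pvWitness_get_percentile_number : Int × List Int := (5, [1, 3, 7])

def Spec_get_percentile_number (value : Int) (percentiles : List Int) (out : Int) : Prop := out = get_percentile_number_alt value percentiles
instance (value : Int) (percentiles : List Int) (out : Int) : Decidable (Spec_get_percentile_number value percentiles out) := by unfold Spec_get_percentile_number; infer_instance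

-- ===== CLAIM (what is proved, stated in full; the proofs are below) =====
def Claim_equal_get_percentile_number : Prop := ∀ (value : Int) (percentiles : List Int), Dom_get_percentile_number value percentiles → Pre_get_percentile_number value percentiles → Spec_get_percentile_number value percentiles (get_percentile_number value percentiles)

-- ===== LEMMAS AND PROOFS =====

-- the qualifying ("hit") indices of the interval [lo, hi) (proof-side abbreviation)
def pnHits (value : Int) (ps : List Int) (lo hi : Int) : List Int :=
  (PySem.List.pyRange lo hi 1).filter
    (fun i => decide (PySem.List.pyGetD ps i 0 ≤ value))

-- any last element of the hit list lies in [lo, hi)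
theorem pnHits_getLast_bounds (value : Int) (ps : List Int) (lo hi : Int) (x : Int)
    (h : (pnHits value ps lo hi).getLast? = some x) : lo ≤ x ∧ x < hi := by
  have hx : x ∈ pnHits value ps lo hi := List.mem_of_getLast? h
  have := List.mem_of_mem_filter hx
  exact PySem.List.mem_pyRange_one.mp this

-- B's divide-and-conquer returns the last (= largest) hit index of [lo, hi), or 0
theorem pnRightFuel_eq_lastHit (value : Int) (ps : List Int) :
    ∀ (k : Nat) (lo hi : Int), (hi - lo).toNat ≤ k → 1 ≤ lo →
      pnRightFuel value ps k lo hi = ((pnHits value ps lo hi).getLast?).getD 0 := by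
  intro k
  induction k with
  | zero =>
    intro lo hi hk _
    have hle : hi ≤ lo := by omega
    have hnil : pnHits value ps lo hi = [] := by
      unfold pnHits; rw [PySem.List.pyRange_one_eq_nil hle]; rfl
    rw [hnil]; rfl
  | succ k ih =>
    intro lo hi hk hlo
    by_cases hbase : hi - lo ≤ 1
    · by_cases hlt : lo < hi
      · have hhi : hi = lo + 1 := by omega
        subst hhi
        have hsing : PySem.List.pyRange lo (lo + 1) 1 = [lo] :=
          PySem.List.pyRange_one_singleton lo
        rw [pnRightFuel, if_pos hbase]
        unfold pnHits
        rw [hsing]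
        by_cases hp : PySem.List.pyGetD ps lo 0 ≤ value
        · rw [if_pos ⟨by omega, hp⟩]
          simp [hp]
        · rw [if_neg (by tauto)]
          simp [hp]
      · have hnil : pnHits value ps lo hi = [] := by
          unfold pnHits; rw [PySem.List.pyRange_one_eq_nil (by omega)]; rfl
        rw [pnRightFuel, if_pos hbase, if_neg (by tauto), hnil]; rfl
    · -- recursive case: split [lo, hi) at the midpoint
      have hm : PySem.Int.floordiv (lo + hi) 2 = (lo + hi) / 2 :=
        PySem.Int.floordiv_eq_ediv_of_pos (by norm_num)
      have hb1 : lo + 1 ≤ PySem.Int.floordiv (lo + hi) 2 := by rw [hm]; omega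
      have hb2 : PySem.Int.floordiv (lo + hi) 2 ≤ hi - 1 := by rw [hm]; omega
      have ihR := ih (PySem.Int.floordiv (lo + hi) 2) hi (by omega) (by omega)
      have ihL := ih lo (PySem.Int.floordiv (lo + hi) 2) (by omega) hlo
      have hsplit : pnHits value ps lo hi =
          pnHits value ps lo (PySem.Int.floordiv (lo + hi) 2) ++
            pnHits value ps (PySem.Int.floordiv (lo + hi) 2) hi := by
        unfold pnHits
        rw [PySem.List.pyRange_one_append lo (PySem.Int.floordiv (lo + hi) 2) hi
              (by omega) (by omega), List.filter_append]
      rw [pnRightFuel, if_neg hbase, hsplit, List.getLast?_append]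
      show (if pnRightFuel value ps k (PySem.Int.floordiv (lo + hi) 2) hi ≠ 0 then
              pnRightFuel value ps k (PySem.Int.floordiv (lo + hi) 2) hi
            else pnRightFuel value ps k lo (PySem.Int.floordiv (lo + hi) 2)) = _
      rcases hR : (pnHits value ps (PySem.Int.floordiv (lo + hi) 2) hi).getLast?
        with _ | v
      · -- no hit on the right: recurse left
        rw [ihR, hR]
        simp only [Option.getD_none, ne_eq, not_true_eq_false, if_false,
          Option.none_or]
        exact ihL
      · -- the right half has a hit: its last hit is the answer, and it is nonzero
        have hv := pnHits_getLast_bounds value ps (PySem.Int.floordiv (lo + hi) 2)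
          hi v hR
        rw [ihR, hR]
        simp only [Option.getD_some, Option.some_or, ne_eq]
        rw [if_pos (by omega)]

-- A's backward first-hit scan over [m, …, 1] also yields the last hit of [1, m+1)
theorem pnLoopA_eq_lastHit (value : Int) (ps : List Int) :
    ∀ (m : Nat), m < ps.length →
      pnLoopA value ps (PySem.List.pyRange (m : Int) 0 (-1)) =
        ((pnHits value ps 1 ((m : Int) + 1)).getLast?).getD 0 := by
  intro m
  induction m with
  | zero =>
    intro _
    have h0 : pnHits value ps 1 ((0 : Int) + 1) = [] := by
      unfold pnHits
      rw [PySem.List.pyRange_one_eq_nil (by norm_num)]; rfl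
    rw [PySem.List.pyRange_neg_one_eq_nil (by norm_num)]
    norm_num at h0 ⊢
    rw [h0]; rfl
  | succ m ih =>
    intro hm
    have ih1 := ih (by omega)
    have hgetD : PySem.List.pyGetD ps ((m : Int) + 1) 0 = ps[m + 1] := by
      rw [PySem.List.pyGetD_eq_getElem ps 0 (by positivity) (by omega)]
      congr 1
    have hget? : PySem.List.pyGet? ps ((m : Int) + 1) = some ps[m + 1] := by
      rw [show ((m : Int) + 1) = ((m + 1 : Nat) : Int) by push_cast; ring,
          PySem.List.pyGet?_natCast]
      exact List.getElem?_eq_getElem hm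
    -- split the hit list at the new top index m+1
    have hsplit : pnHits value ps 1 (((m : Int) + 1) + 1) =
        pnHits value ps 1 ((m : Int) + 1) ++
          (if ps[m + 1] ≤ value then [(m : Int) + 1] else []) := by
      unfold pnHits
      rw [PySem.List.pyRange_one_succ_right (show (1:Int) ≤ (m : Int) + 1 by omega),
          List.filter_append]
      congr 1
      simp [List.filter_singleton, hgetD]
    -- A's scan puts the new top index in front
    rw [show ((m + 1 : Nat) : Int) = (m : Int) + 1 by push_cast; ring,
        PySem.List.pyRange_neg_one_cons (by positivity)]
    rw [hsplit, List.getLast?_append]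
    by_cases hp : ps[m + 1] ≤ value
    · rw [if_pos hp]
      simp only [pnLoopA, hget?, if_pos hp, add_sub_cancel_right]
      rfl
    · rw [if_neg hp]
      simp only [pnLoopA, hget?, if_neg hp, add_sub_cancel_right, List.getLast?_nil,
        Option.none_or]
      exact ih1

-- ===== VERDICT (by name: the statement is the Claim_ definition above) =====
theorem get_percentile_number_spec : Claim_equal_get_percentile_number := by
  intro value ps _ hne
  unfold Spec_get_percentile_number get_percentile_number get_percentile_number_alt
  have hn : 0 < ps.length := List.length_pos_iff.mpr hne
  have hlastIdx : ps.length - 1 < ps.length := by omega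
  have h0 : PySem.List.pyGet? ps 0 = some ps[0] := by
    rw [show (0 : Int) = ((0 : Nat) : Int) by norm_num, PySem.List.pyGet?_natCast]
    exact List.getElem?_eq_getElem hn
  have hlast : PySem.List.pyGet? ps ((ps.length : Int) - 1) = some ps[ps.length - 1] := by
    rw [show ((ps.length : Int) - 1) = ((ps.length - 1 : Nat) : Int) by omega,
        PySem.List.pyGet?_natCast]
    exact List.getElem?_eq_getElem hlastIdx
  rw [h0, hlast]
  by_cases hle : value ≤ ps[0]
  · simp [hle]
  · simp only [if_neg hle]
    by_cases hge : value ≥ ps[ps.length - 1]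
    · simp [hge]
    · simp only [if_neg hge]
      have hA := pnLoopA_eq_lastHit value ps (ps.length - 1) hlastIdx
      have hB : pnRight value ps 1 (ps.length : Int) =
          ((pnHits value ps 1 (ps.length : Int)).getLast?).getD 0 := by
        unfold pnRight
        exact pnRightFuel_eq_lastHit value ps ((ps.length : Int) - 1).toNat 1
          (ps.length : Int) (by omega) (by omega)
      rw [show ((ps.length : Int) - 1) = ((ps.length - 1 : Nat) : Int) by omega, hA, hB,
          show (((ps.length - 1 : Nat) : Int) + 1) = (ps.length : Int) by omega]
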